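-- pv_equiv track=rewrite | github.com/santhosh-deshineni/COL215 | Assignment-3/215a3.py | regiongenerator
-- ===== SOURCE A (Python) =====
-- def regiongenerator(term,count,lst,DCset):
--     if(count==0):
--         if(tuple(term) not in DCset):
--             lst.append(tuple(term))
--     else:
--         for i in range(len(term)):
--             if(term[i]==None):
--                 regiongenerator(term[:i] + [0] + term[i+1:],count-1,lst,DCset)
--                 regiongenerator(term[:i] + [1] + term[i+1:],count-1,lst,DCset)
--                 break
--     return lst
-- ===== SOURCE B (Python) =====
-- def regiongenerator(term, count, lst, DCset):
--     idxs = [i for i, v in enumerate(term) if v == None]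
--     if len(idxs) < count:
--         return lst
--     sel = idxs[:count]
--     for m in range(2 ** count):
--         new = list(term)
--         b = m
--         for i in reversed(sel):
--             new[i] = b % 2
--             b //= 2
--         t = tuple(new)
--         if t not in DCset:
--             lst.append(t)
--     return lst
-- ===== Notes on version B (the rewrite author's own statement) =====
-- stated objective: alternative
-- what changed: Replaces A's branching recursion (substitute 0/1 at the first None, recurse with count-1) by a single flat loop over m in range(2**count) that decodes m's binary digits into the selected None positions; the recursion disappears entirely.
-- outside the precondition, e.g. on regiongenerator([None, None], 1, [], set()): A returns [(0, None), (1, None)], B returns [(0, None), (1, None)]; on regiongenerator([], -1, [], set()): A returns [], B raises TypeError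
import Mathlib
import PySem

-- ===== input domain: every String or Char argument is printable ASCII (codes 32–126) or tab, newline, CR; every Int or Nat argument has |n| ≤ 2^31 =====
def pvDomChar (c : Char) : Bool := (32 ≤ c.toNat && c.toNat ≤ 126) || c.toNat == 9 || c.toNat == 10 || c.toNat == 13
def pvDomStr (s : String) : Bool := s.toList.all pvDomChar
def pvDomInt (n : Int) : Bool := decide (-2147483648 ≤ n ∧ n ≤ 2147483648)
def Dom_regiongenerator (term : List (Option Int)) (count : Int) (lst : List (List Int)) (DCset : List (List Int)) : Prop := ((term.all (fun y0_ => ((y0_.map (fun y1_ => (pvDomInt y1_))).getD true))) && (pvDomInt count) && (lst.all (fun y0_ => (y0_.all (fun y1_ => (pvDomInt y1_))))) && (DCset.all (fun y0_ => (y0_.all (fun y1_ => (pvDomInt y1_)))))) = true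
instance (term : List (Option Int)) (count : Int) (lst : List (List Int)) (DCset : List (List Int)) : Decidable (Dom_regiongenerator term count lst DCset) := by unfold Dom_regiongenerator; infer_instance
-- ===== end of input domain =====

-- B replaces A's branching recursion by one flat loop over range(2**count) decoding each
-- number's binary digits into the selected None positions (alternative decomposition, same cost).
-- Both A and B mutate lst in place in Python (appending); the equivalence proved here is about
-- the returned list, which is the same object in both.


-- termination helper for Port A (cited in its decreasing_by): replacing the first None
-- found by the scan strictly decreases the number of None entries
theorem pv_countP_set_lt (t : List (Option Int)) (i : Nat) (x : Int)
    (h : t.findIdx? (fun o => o == none) = some i) :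
    ((t.set i (some x)).countP (fun o => o == none)) < t.countP (fun o => o == none) := by
  induction t generalizing i with
  | nil => simp at h
  | cons a tl ih =>
    rw [List.findIdx?_cons] at h
    by_cases ha : (a == none) = true
    · simp only [ha, if_pos] at h
      cases h
      cases a with
      | none => simp [List.countP_cons]
      | some v => simp at ha
    · simp only [ha, Bool.false_eq_true, if_neg, not_false_iff, Option.map_eq_some_iff] at h
      obtain ⟨j, hj, hij⟩ := h
      subst hij
      have := ih j hj
      rw [List.set_cons_succ]
      simp only [List.countP_cons, ha]
      omega

-- ===== PORT A =====
-- Python A: recursion substituting 0/1 for the first None ('for i in range(len(term)): if term[i]==None: … break'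
-- is the scan findIdx?; 'term[:i]+[b]+term[i+1:]' with i < len(term) is List.set).  'tuple(term)' is compared
-- with / appended to lists of ints: inside Pre_ it is reached only when no None remains, so the embedding
-- 'map (·.getD 0)' is exact there.
def regiongenerator (term : List (Option Int)) (count : Int) (lst : List (List Int)) (DCset : List (List Int)) : List (List Int) :=
  if count = 0 then
    if term.map (fun o => o.getD 0) ∈ DCset then lst
    else lst ++ [term.map (fun o => o.getD 0)]
  else
    match h : term.findIdx? (fun o => o == none) with
    | none => lst
    | some i =>
      regiongenerator (term.set i (some 1)) (count - 1)
        (regiongenerator (term.set i (some 0)) (count - 1) lst DCset) DCset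
termination_by term.countP (fun o => o == none)
decreasing_by
  · exact pv_countP_set_lt term i 0 h
  · exact pv_countP_set_lt term i 1 h

-- ===== PORT B =====
-- Python B: idxs = indices of None (list comprehension over enumerate); guard len(idxs) < count;
-- sel = idxs[:count]; for m in range(2**count): decode m's binary digits into positions sel
-- (for i in reversed(sel): new[i] = b % 2; b //= 2), append tuple if not in DCset.
-- '2 ** count' is ported as 2 ^ count.toNat (Pre_ demands 0 ≤ count; Python raises for count < 0);
-- 'i.toNat' is exact since enumerate indices are nonnegative.
def regiongenerator_alt (term : List (Option Int)) (count : Int) (lst : List (List Int)) (DCset : List (List Int)) : List (List Int) :=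
  let idxs : List Int := ((PySem.List.enumerate term 0).filter (fun p => p.2 == none)).map (fun p => p.1)
  if (idxs.length : Int) < count then lst
  else
    let sel := PySem.List.slice idxs none (some count)
    (PySem.List.pyRange 0 ((2 : Int) ^ count.toNat) 1).foldl (fun acc m =>
      let st := sel.reverse.foldl
        (fun (st : Int × List (Option Int)) i =>
          (PySem.Int.floordiv st.1 2, st.2.set i.toNat (some (PySem.Int.mod st.1 2)))) (m, term)
      let t := st.2.map (fun o => o.getD 0)
      if t ∈ DCset then acc else acc ++ [t]) lst

-- ===== PRECONDITION & SPEC =====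
-- Pre_ excludes (a) negative count, where A recurses unboundedly (RecursionError) whenever a None is
-- present and B raises TypeError, and (b) inputs with more None entries than count, where A returns
-- tuples still containing None — not values of the declared List Int type (B returns the same tuples there).
def Pre_regiongenerator (term : List (Option Int)) (count : Int) (lst : List (List Int)) (DCset : List (List Int)) : Prop :=
  0 ≤ count ∧ ((term.countP (fun o => o == none) : Int) ≤ count)
instance (term : List (Option Int)) (count : Int) (lst : List (List Int)) (DCset : List (List Int)) : Decidable (Pre_regiongenerator term count lst DCset) := by unfold Pre_regiongenerator; infer_instance

def pvWitness_regiongenerator : List (Option Int) × Int × List (List Int) × List (List Int) :=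
  ([some 1, none], 1, [], [[1, 1]])

def Spec_regiongenerator (term : List (Option Int)) (count : Int) (lst : List (List Int)) (DCset : List (List Int)) (out : List (List Int)) : Prop := out = regiongenerator_alt term count lst DCset
instance (term : List (Option Int)) (count : Int) (lst : List (List Int)) (DCset : List (List Int)) (out : List (List Int)) : Decidable (Spec_regiongenerator term count lst DCset out) := by unfold Spec_regiongenerator; infer_instance

-- ===== CLAIM (what is proved, stated in full; the proofs are below) =====
def Claim_equal_regiongenerator : Prop := ∀ (term : List (Option Int)) (count : Int) (lst : List (List Int)) (DCset : List (List Int)), Dom_regiongenerator term count lst DCset → Pre_regiongenerator term count lst DCset → Spec_regiongenerator term count lst DCset (regiongenerator term count lst DCset)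

-- ===== LEMMAS AND PROOFS =====

-- indices (from offset s) of the None entries of a list
def aidx : Nat → List (Option Int) → List Nat
  | _, [] => []
  | s, a :: t => if a == none then s :: aidx (s + 1) t else aidx (s + 1) t

-- Nat model of B's inner digit-decoding fold (foldr form of 'for i in reversed(sel)')
def gfill : List Nat → Nat × List (Option Int) → Nat × List (Option Int)
  | [], st => st
  | i :: sel, st =>
    let st' := gfill sel st
    (st'.1 / 2, st'.2.set i (some ((st'.1 % 2 : Nat) : Int)))

-- the common append step: emit the completed term unless it is a don't-care
def genStep (DC : List (List Int)) (acc : List (List Int)) (t : List (Option Int)) : List (List Int) :=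
  if t.map (fun o => o.getD 0) ∈ DC then acc else acc ++ [t.map (fun o => o.getD 0)]

-- B's outer loop, in Nat form
def loopN (sel : List Nat) (c : Nat) (t : List (Option Int)) (DC lst : List (List Int)) : List (List Int) :=
  (List.range (2 ^ c)).foldl (fun acc n => genStep DC acc (gfill sel (n, t)).2) lst

-- the common specification tree: expand every None, first None most significant, 0 before 1
def gen (t : List (Option Int)) (DC : List (List Int)) : List (List Int) :=
  match h : t.findIdx? (fun o => o == none) with
  | none => genStep DC [] t
  | some i => gen (t.set i (some 0)) DC ++ gen (t.set i (some 1)) DC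
termination_by t.countP (fun o => o == none)
decreasing_by
  · exact pv_countP_set_lt t i 0 h
  · exact pv_countP_set_lt t i 1 h

theorem aidx_length (t : List (Option Int)) : ∀ s, (aidx s t).length = t.countP (fun o => o == none) := by
  induction t with
  | nil => intro s; rfl
  | cons a tl ih =>
    intro s
    simp only [aidx, List.countP_cons]
    by_cases ha : (a == none) = true
    · simp [ha, ih]
    · simp [ha, ih]

theorem enumerate_filter_eq_aidx (t : List (Option Int)) :
    ∀ s : Nat, (((PySem.List.enumerate t (s : Int)).filter (fun p => p.2 == none)).map (fun p => p.1))
      = (aidx s t).map (fun k => Int.ofNat k) := by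
  induction t with
  | nil => intro s; simp [PySem.List.enumerate_nil, aidx]
  | cons a tl ih =>
    intro s
    rw [PySem.List.enumerate_cons]
    have h1 : PySem.List.enumerate tl ((s : Int) + 1) = PySem.List.enumerate tl ((s + 1 : Nat) : Int) := by
      norm_cast
    by_cases ha : (a == none) = true
    · rw [List.filter_cons_of_pos (by simpa using ha)]
      simp only [aidx]
      rw [if_pos ha, h1, List.map_cons, ih (s + 1)]
      simp
    · rw [List.filter_cons_of_neg (by simpa using ha)]
      simp only [aidx]
      rw [if_neg ha, h1, ih (s + 1)]

theorem aidx_of_findIdx?_some (t : List (Option Int)) (i : Nat)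
    (h : t.findIdx? (fun o => o == none) = some i) (x : Int) :
    ∀ s, aidx s t = (s + i) :: aidx s (t.set i (some x)) := by
  induction t generalizing i with
  | nil => simp at h
  | cons a tl ih =>
    intro s
    rw [List.findIdx?_cons] at h
    by_cases ha : (a == none) = true
    · simp only [ha, if_pos] at h
      cases h
      cases a with
      | none => simp [aidx]
      | some v => simp at ha
    · simp only [ha, Bool.false_eq_true, if_neg, not_false_iff, Option.map_eq_some_iff] at h
      obtain ⟨j, hj, hij⟩ := h
      subst hij
      rw [List.set_cons_succ]
      simp only [aidx]
      rw [if_neg ha, if_neg ha]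
      rw [ih j hj (s + 1)]
      congr 1
      omega

theorem mem_aidx (t : List (Option Int)) :
    ∀ s k, k ∈ aidx s t → ∃ j, k = s + j ∧ t[j]? = some none := by
  induction t with
  | nil => intro s k h; simp [aidx] at h
  | cons a tl ih =>
    intro s k h
    simp only [aidx] at h
    by_cases ha : (a == none) = true
    · simp only [ha, if_pos, List.mem_cons] at h
      rcases h with h | h
      · exact ⟨0, by omega, by cases a with | none => simp | some v => simp at ha⟩
      · obtain ⟨j, hk, hj⟩ := ih (s + 1) k h
        exact ⟨j + 1, by omega, by simpa using hj⟩
    · simp only [ha, Bool.false_eq_true, if_neg, not_false_iff] at h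
      obtain ⟨j, hk, hj⟩ := ih (s + 1) k h
      exact ⟨j + 1, by omega, by simpa using hj⟩

theorem not_mem_aidx_set (t : List (Option Int)) (i : Nat) (x : Int) :
    i ∉ aidx 0 (t.set i (some x)) := by
  intro hmem
  obtain ⟨j, hk, hj⟩ := mem_aidx _ 0 i hmem
  have hji : j = i := by omega
  subst hji
  by_cases hlen : j < t.length
  · rw [List.getElem?_set_self hlen] at hj
    simp at hj
  · have hnone : (t.set j (some x))[j]? = none :=
      List.getElem?_eq_none (by simpa using Nat.le_of_not_lt hlen)
    rw [hnone] at hj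
    simp at hj

theorem gfill_fst (sel : List Nat) : ∀ st : Nat × List (Option Int), (gfill sel st).1 = st.1 / 2 ^ sel.length := by
  induction sel with
  | nil => intro st; simp [gfill]
  | cons i sel ih =>
    intro st
    simp only [gfill, ih, List.length_cons, pow_succ, Nat.div_div_eq_div_mul]

theorem gfill_snd_hi (sel : List Nat) : ∀ (t : List (Option Int)) (n b : Nat),
    (gfill sel (n + b * 2 ^ sel.length, t)).2 = (gfill sel (n, t)).2 := by
  induction sel with
  | nil => intro t n b; rfl
  | cons i sel ih =>
    intro t n b
    have hlen : n + b * 2 ^ (i :: sel).length = n + 2 ^ sel.length * (2 * b) := by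
      simp only [List.length_cons, pow_succ]; ring
    rw [hlen]
    have hpos : 0 < 2 ^ sel.length := (by positivity : (0:Nat) < 2 ^ sel.length)
    have hdiv : (n + 2 ^ sel.length * (2 * b)) / 2 ^ sel.length = n / 2 ^ sel.length + 2 * b :=
      Nat.add_mul_div_left n (2 * b) hpos
    have hmul : n + 2 ^ sel.length * (2 * b) = n + (2 * b) * 2 ^ sel.length := by ring
    simp only [gfill]
    rw [hmul, ih t n (2 * b), gfill_fst, gfill_fst, ← hmul, hdiv]
    have hmod : (n / 2 ^ sel.length + 2 * b) % 2 = n / 2 ^ sel.length % 2 := by omega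
    rw [hmod]

theorem gfill_set_comm (sel : List Nat) : ∀ (i : Nat) (x : Option Int) (n : Nat) (t : List (Option Int)),
    i ∉ sel → gfill sel (n, t.set i x) = ((gfill sel (n, t)).1, (gfill sel (n, t)).2.set i x) := by
  induction sel with
  | nil => intro i x n t _; rfl
  | cons j sel ih =>
    intro i x n t hmem
    have hji : i ≠ j := fun e => hmem (e ▸ List.mem_cons_self)
    have hi : i ∉ sel := fun m => hmem (List.mem_cons_of_mem _ m)
    simp only [gfill, ih i x n t hi]
    rw [List.set_comm _ _ hji]

theorem loopN_split (sel : List Nat) (i : Nat) (t : List (Option Int)) (DC lst : List (List Int))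
    (hi : i ∉ sel) :
    loopN (i :: sel) (sel.length + 1) t DC lst
      = loopN sel sel.length (t.set i (some 1)) DC (loopN sel sel.length (t.set i (some 0)) DC lst) := by
  unfold loopN
  have h2 : 2 ^ (sel.length + 1) = 2 ^ sel.length + 2 ^ sel.length := by rw [pow_succ]; omega
  have hpos : 0 < 2 ^ sel.length := Nat.pow_pos (by omega)
  have hfst : ∀ n : Nat, n < 2 ^ sel.length →
      (gfill (i :: sel) (n, t)).2 = (gfill sel (n, t.set i (some 0))).2 := by
    intro n hn
    simp only [gfill]
    rw [gfill_set_comm sel i (some (0 : Int)) n t hi, gfill_fst, Nat.div_eq_of_lt hn]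
    norm_num
  have hsnd : ∀ n : Nat, n < 2 ^ sel.length →
      (gfill (i :: sel) (2 ^ sel.length + n, t)).2 = (gfill sel (n, t.set i (some 1))).2 := by
    intro n hn
    simp only [gfill]
    rw [gfill_set_comm sel i (some (1 : Int)) n t hi]
    have he : 2 ^ sel.length + n = n + 1 * 2 ^ sel.length := by ring
    rw [he, gfill_snd_hi sel t n 1, gfill_fst, one_mul, Nat.add_div_right _ hpos,
      Nat.div_eq_of_lt hn]
    norm_num
  have e0 : List.foldl (fun acc n => genStep DC acc (gfill (i :: sel) (n, t)).2) lst
        (List.range (2 ^ sel.length))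
      = List.foldl (fun acc n => genStep DC acc (gfill sel (n, t.set i (some 0))).2) lst
        (List.range (2 ^ sel.length)) :=
    PySem.List.foldl_congr_mem _ _ _ _ (fun acc n hn => by rw [hfst n (List.mem_range.mp hn)])
  have e1 : ∀ start : List (List Int),
      List.foldl (fun acc n => genStep DC acc (gfill (i :: sel) (2 ^ sel.length + n, t)).2) start
        (List.range (2 ^ sel.length))
      = List.foldl (fun acc n => genStep DC acc (gfill sel (n, t.set i (some 1))).2) start
        (List.range (2 ^ sel.length)) :=
    fun start => PySem.List.foldl_congr_mem _ _ _ _ (fun acc n hn => by rw [hsnd n (List.mem_range.mp hn)])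
  rw [h2, List.range_add, List.foldl_append, List.foldl_map, e0, e1]

theorem genStep_append (DC lst : List (List Int)) (t : List (Option Int)) :
    genStep DC lst t = lst ++ genStep DC [] t := by
  unfold genStep
  split_ifs <;> simp

theorem findIdx?_of_countP_pos (t : List (Option Int))
    (h : 0 < t.countP (fun o => o == none)) :
    ∃ i, t.findIdx? (fun o => o == none) = some i := by
  cases hf : t.findIdx? (fun o => o == none) with
  | some i => exact ⟨i, rfl⟩
  | none =>
    rw [List.findIdx?_eq_none_iff] at hf
    have h0 : t.countP (fun o => o == none) = 0 :=
      List.countP_eq_zero.mpr (by intro x hx; simpa [Option.isSome_iff_ne_none] using hf x hx)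
    omega

theorem loopN_eq_gen : ∀ (c : Nat) (t : List (Option Int)) (DC lst : List (List Int)),
    t.countP (fun o => o == none) = c → loopN (aidx 0 t) c t DC lst = lst ++ gen t DC := by
  intro c
  induction c with
  | zero =>
    intro t DC lst hcp
    have hf : t.findIdx? (fun o => o == none) = none :=
      List.findIdx?_eq_none_iff.mpr (by
        intro x hx
        have := List.countP_eq_zero.mp hcp x hx
        simpa [Option.isSome_iff_ne_none] using this)
    have hnil : aidx 0 t = [] :=
      List.eq_nil_of_length_eq_zero (by rw [aidx_length t 0, hcp])
    rw [hnil]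
    unfold loopN
    rw [gen.eq_def, hf]
    simp only [pow_zero, List.range_one, List.foldl_cons, List.foldl_nil, gfill]
    exact genStep_append DC lst t
  | succ c ih =>
    intro t DC lst hcp
    have hpos : 0 < t.countP (fun o => o == none) := by omega
    obtain ⟨i, hf⟩ := findIdx?_of_countP_pos t hpos
    have key0 := aidx_of_findIdx?_some t i hf 0 0
    have key1 := aidx_of_findIdx?_some t i hf 1 0
    have hsel : aidx 0 (t.set i (some 1)) = aidx 0 (t.set i (some 0)) := by
      have := key0.symm.trans key1
      exact (List.cons.injEq _ _ _ _ ▸ this).2.symm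
    have hlen0 : (aidx 0 (t.set i (some 0))).length = c := by
      have h1 : (aidx 0 t).length = c + 1 := by rw [aidx_length t 0, hcp]
      rw [key0] at h1
      simpa using h1
    have hcp0 : (t.set i (some 0)).countP (fun o => o == none) = c := by
      rw [← aidx_length (t.set i (some 0)) 0, hlen0]
    have hcp1 : (t.set i (some 1)).countP (fun o => o == none) = c := by
      rw [← aidx_length (t.set i (some 1)) 0, hsel, hlen0]
    have hnm : i ∉ aidx 0 (t.set i (some 0)) := not_mem_aidx_set t i 0
    have hkey : aidx 0 t = i :: aidx 0 (t.set i (some 0)) := by simpa using key0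
    rw [hkey]
    have hc1 : c + 1 = (aidx 0 (t.set i (some 0))).length + 1 := by rw [hlen0]
    rw [hc1, loopN_split _ i t DC lst hnm, hlen0]
    have hstep0 : loopN (aidx 0 (t.set i (some 0))) c (t.set i (some 0)) DC lst
        = lst ++ gen (t.set i (some 0)) DC := ih (t.set i (some 0)) DC lst hcp0
    have hstep1 : ∀ acc, loopN (aidx 0 (t.set i (some 1))) c (t.set i (some 1)) DC acc
        = acc ++ gen (t.set i (some 1)) DC := fun acc => ih (t.set i (some 1)) DC acc hcp1
    rw [hsel] at hstep1
    rw [hstep0, hstep1]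
    conv_rhs => rw [gen.eq_def, hf]
    simp [List.append_assoc]

theorem regiongenerator_eq_gen : ∀ (c : Nat) (t : List (Option Int)) (count : Int) (lst DC : List (List Int)),
    count = (c : Int) → t.countP (fun o => o == none) = c →
    regiongenerator t count lst DC = lst ++ gen t DC := by
  intro c
  induction c with
  | zero =>
    intro t count lst DC hc hcp
    subst hc
    have hf : t.findIdx? (fun o => o == none) = none :=
      List.findIdx?_eq_none_iff.mpr (by
        intro x hx
        have := List.countP_eq_zero.mp hcp x hx
        simpa [Option.isSome_iff_ne_none] using this)
    rw [regiongenerator.eq_def, gen.eq_def, hf]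
    norm_num
    exact genStep_append DC lst t
  | succ c ih =>
    intro t count lst DC hc hcp
    subst hc
    obtain ⟨i, hf⟩ := findIdx?_of_countP_pos t (by omega)
    have key0 := aidx_of_findIdx?_some t i hf 0 0
    have key1 := aidx_of_findIdx?_some t i hf 1 0
    have hsel : aidx 0 (t.set i (some 1)) = aidx 0 (t.set i (some 0)) := by
      have := key0.symm.trans key1
      exact (List.cons.injEq _ _ _ _ ▸ this).2.symm
    have hlen0 : (aidx 0 (t.set i (some 0))).length = c := by
      have h1 : (aidx 0 t).length = c + 1 := by rw [aidx_length t 0, hcp]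
      rw [key0] at h1
      simpa using h1
    have hcp0 : (t.set i (some 0)).countP (fun o => o == none) = c := by
      rw [← aidx_length (t.set i (some 0)) 0, hlen0]
    have hcp1 : (t.set i (some 1)).countP (fun o => o == none) = c := by
      rw [← aidx_length (t.set i (some 1)) 0, hsel, hlen0]
    have hne : ¬ ((c : Int) + 1 = 0) := by omega
    rw [regiongenerator.eq_def]
    have hcast : ((c + 1 : Nat) : Int) = (c : Int) + 1 := by push_cast; ring
    rw [hcast]
    rw [if_neg hne, hf]
    have hsub : (c : Int) + 1 - 1 = (c : Int) := by ring
    rw [hsub]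
    show regiongenerator (t.set i (some 1)) (c : Int)
        (regiongenerator (t.set i (some 0)) (c : Int) lst DC) DC = lst ++ gen t DC
    rw [ih (t.set i (some 0)) (c : Int) lst DC rfl hcp0]
    rw [ih (t.set i (some 1)) (c : Int) (lst ++ gen (t.set i (some 0)) DC) DC rfl hcp1]
    conv_rhs => rw [gen.eq_def, hf]
    simp [List.append_assoc]

theorem regiongenerator_lt (c : Nat) : ∀ (t : List (Option Int)) (count : Int) (lst DC : List (List Int)),
    t.countP (fun o => o == none) = c → (c : Int) < count →
    regiongenerator t count lst DC = lst := by
  induction c with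
  | zero =>
    intro t count lst DC hcp hlt
    have hf : t.findIdx? (fun o => o == none) = none :=
      List.findIdx?_eq_none_iff.mpr (by
        intro x hx
        have := List.countP_eq_zero.mp hcp x hx
        simpa [Option.isSome_iff_ne_none] using this)
    rw [regiongenerator.eq_def, if_neg (by omega : ¬ count = 0), hf]
  | succ c ih =>
    intro t count lst DC hcp hlt
    obtain ⟨i, hf⟩ := findIdx?_of_countP_pos t (by omega)
    have key0 := aidx_of_findIdx?_some t i hf 0 0
    have key1 := aidx_of_findIdx?_some t i hf 1 0
    have hsel : aidx 0 (t.set i (some 1)) = aidx 0 (t.set i (some 0)) := by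
      have := key0.symm.trans key1
      exact (List.cons.injEq _ _ _ _ ▸ this).2.symm
    have hlen0 : (aidx 0 (t.set i (some 0))).length = c := by
      have h1 : (aidx 0 t).length = c + 1 := by rw [aidx_length t 0, hcp]
      rw [key0] at h1
      simpa using h1
    have hcp0 : (t.set i (some 0)).countP (fun o => o == none) = c := by
      rw [← aidx_length (t.set i (some 0)) 0, hlen0]
    have hcp1 : (t.set i (some 1)).countP (fun o => o == none) = c := by
      rw [← aidx_length (t.set i (some 1)) 0, hsel, hlen0]
    rw [regiongenerator.eq_def, if_neg (by omega : ¬ count = 0), hf]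
    show regiongenerator (t.set i (some 1)) (count - 1)
        (regiongenerator (t.set i (some 0)) (count - 1) lst DC) DC = lst
    rw [ih (t.set i (some 0)) (count - 1) lst DC hcp0 (by omega)]
    rw [ih (t.set i (some 1)) (count - 1) lst DC hcp1 (by omega)]

theorem foldl_rev_eq_gfill (selN : List Nat) (n : Nat) (t : List (Option Int)) :
    ((selN.map (fun k => Int.ofNat k)).reverse.foldl
      (fun (st : Int × List (Option Int)) i =>
        (PySem.Int.floordiv st.1 2, st.2.set i.toNat (some (PySem.Int.mod st.1 2)))) ((n : Int), t))
    = (((gfill selN (n, t)).1 : Int), (gfill selN (n, t)).2) := by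
  induction selN with
  | nil => rfl
  | cons i sel ih =>
    rw [List.map_cons, List.reverse_cons, List.foldl_append, ih]
    simp only [List.foldl_cons, List.foldl_nil]
    have e1 : PySem.Int.floordiv (((gfill sel (n, t)).1 : Nat) : Int) 2
        = (((gfill sel (n, t)).1 / 2 : Nat) : Int) := by
      exact_mod_cast PySem.Int.floordiv_natCast (gfill sel (n, t)).1 2
    have e2 : PySem.Int.mod (((gfill sel (n, t)).1 : Nat) : Int) 2
        = (((gfill sel (n, t)).1 % 2 : Nat) : Int) := by
      exact_mod_cast PySem.Int.mod_natCast (gfill sel (n, t)).1 2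
    simp only [gfill, e1, e2, Int.toNat_natCast]
    rfl

-- ===== VERDICT (by name: the statement is the Claim_ definition above) =====
theorem regiongenerator_spec : Claim_equal_regiongenerator := by
  intro term count lst DCset _ hpre
  obtain ⟨hc0, hcle⟩ := hpre
  unfold Spec_regiongenerator
  have hidx : ((PySem.List.enumerate term 0).filter (fun p => p.2 == none)).map (fun p => p.1)
      = (aidx 0 term).map (fun k => Int.ofNat k) := by
    have h := enumerate_filter_eq_aidx term 0
    simpa using h
  have hlenN : ((aidx 0 term).map (fun k => Int.ofNat k)).length
      = term.countP (fun o => o == none) := by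
    rw [List.length_map, aidx_length]
  simp only [regiongenerator_alt, hidx, hlenN]
  by_cases hlt : ((term.countP (fun o => o == none) : Int)) < count
  · rw [if_pos hlt]
    exact regiongenerator_lt _ term count lst DCset rfl hlt
  · rw [if_neg hlt]
    have hceq : ((term.countP (fun o => o == none) : Int)) = count :=
      le_antisymm hcle (not_lt.mp hlt)
    have htn : count.toNat = term.countP (fun o => o == none) := by omega
    have hslice : PySem.List.slice ((aidx 0 term).map (fun k => Int.ofNat k)) none (some count)
        = (aidx 0 term).map (fun k => Int.ofNat k) := by
      rw [PySem.List.slice_to _ hc0]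
      exact List.take_of_length_le (by rw [hlenN, htn])
    rw [hslice]
    have hpow : (2 : Int) ^ count.toNat = ((2 ^ count.toNat : Nat) : Int) := by push_cast; rfl
    rw [hpow, PySem.List.pyRange_zero_natCast, List.foldl_map]
    have hbody : ∀ (acc : List (List Int)) (k : Nat), k ∈ List.range (2 ^ count.toNat) →
        (fun acc (m : Int) =>
          let st := ((aidx 0 term).map (fun k => Int.ofNat k)).reverse.foldl
            (fun (st : Int × List (Option Int)) i =>
              (PySem.Int.floordiv st.1 2, st.2.set i.toNat (some (PySem.Int.mod st.1 2)))) (m, term)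
          let t := st.2.map (fun o => o.getD 0)
          if t ∈ DCset then acc else acc ++ [t]) acc ((k : Nat) : Int)
        = genStep DCset acc (gfill (aidx 0 term) (k, term)).2 := by
      intro acc k _
      simp only [foldl_rev_eq_gfill (aidx 0 term) k term, genStep]
    rw [PySem.List.foldl_congr_mem _ _ _ _ hbody]
    have hloop : (List.range (2 ^ count.toNat)).foldl
        (fun acc k => genStep DCset acc (gfill (aidx 0 term) (k, term)).2) lst
        = loopN (aidx 0 term) count.toNat term DCset lst := rfl
    rw [hloop, htn, loopN_eq_gen _ term DCset lst rfl]
    exact regiongenerator_eq_gen _ term count lst DCset (by omega) rfl
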